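-- pv_equiv track=rewrite | github.com/petteriTeikari/foundation_PLR | tests/test_guardrails/test_docs_links.py | _lines_outside_code_fences
-- ===== SOURCE A (Python) =====
-- def _lines_outside_code_fences(content: str) -> list[tuple[int, str]]:
--     """Yield (line_number, line) for lines NOT inside fenced code blocks."""
--     result = []
--     in_fence = False
--     for line_num, line in enumerate(content.splitlines(), 1):
--         stripped = line.strip()
--         if stripped.startswith("```"):
--             in_fence = not in_fence
--             continue
--         if not in_fence:
--             result.append((line_num, line))
--     return result
-- ===== SOURCE B (Python) =====
-- def _lines_outside_code_fences(content: str) -> list[tuple[int, str]]: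
--     """Yield (line_number, line) for lines NOT inside fenced code blocks."""
--     # Split the numbered lines into segments delimited by fence-marker lines,
--     # then keep every other segment (outside regions), dropping a trailing
--     # segment that lies inside an unclosed fence.
--     segments = []
--     current = []
--     for pair in enumerate(content.splitlines(), 1):
--         if pair[1].strip().startswith("```"):
--             segments.append(current)
--             current = []
--         else:
--             current.append(pair)
--     segments.append(current)
--     if len(segments) % 2 == 0:
--         segments.pop()  # trailing segment lies inside an unclosed fence
--     out = []
--     k = 0
--     while k < len(segments):
--         out.extend(segments[k])
--         k += 2
--     return out
-- ===== Notes on version B (the rewrite author's own statement) =====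
-- stated objective: alternative
-- what changed: B replaces A's single-pass boolean in-fence toggle with splitting the numbered lines into fence-delimited segments and concatenating every other segment, dropping a trailing segment inside an unclosed fence.
import Mathlib
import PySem

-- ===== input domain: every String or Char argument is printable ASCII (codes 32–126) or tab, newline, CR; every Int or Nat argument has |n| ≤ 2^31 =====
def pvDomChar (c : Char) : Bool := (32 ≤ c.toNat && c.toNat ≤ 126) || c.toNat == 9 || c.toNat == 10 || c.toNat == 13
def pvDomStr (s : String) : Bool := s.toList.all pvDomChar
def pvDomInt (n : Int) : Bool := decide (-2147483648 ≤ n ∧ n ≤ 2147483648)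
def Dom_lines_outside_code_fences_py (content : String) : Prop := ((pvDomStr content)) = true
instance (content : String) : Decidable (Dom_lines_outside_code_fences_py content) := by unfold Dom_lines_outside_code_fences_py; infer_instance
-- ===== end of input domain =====

-- B collects the lines outside fenced code blocks by splitting into fence-delimited segments
-- and keeping every other segment, instead of A's boolean in-fence toggle (alternative, same cost).

-- shared helper: is this (line number, line) pair a fence-marker line?
def pvFence (p : Int × String) : Bool := PySem.Str.startswith (PySem.Str.strip p.2) "```"

-- ===== PORT A =====
-- loop body of A: state = (result, in_fence)
def pvStepA (st : List (Int × String) × Bool) (p : Int × String) : List (Int × String) × Bool :=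
  if pvFence p then (st.1, !st.2)
  else if !st.2 then (st.1 ++ [p], st.2) else st

def lines_outside_code_fences_py (content : String) : List (Int × String) :=
  ((PySem.List.enumerate (PySem.Str.splitlines content) 1).foldl pvStepA ([], false)).1

-- ===== PORT B =====
-- loop body of B's first loop: state = (segments, current)
def pvStepB (st : List (List (Int × String)) × List (Int × String)) (p : Int × String) :
    List (List (Int × String)) × List (Int × String) :=
  if pvFence p then (st.1 ++ [st.2], []) else (st.1, st.2 ++ [p])

-- port of B's final while loop: out.extend(segments[k]); k += 2
def pvTakeAlt (segments : List (List (Int × String))) (k : Nat) : List (Int × String) :=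
  if k < segments.length then segments.getD k [] ++ pvTakeAlt segments (k + 2) else []
termination_by segments.length - k
decreasing_by omega

def lines_outside_code_fences_py_alt (content : String) : List (Int × String) :=
  let st := (PySem.List.enumerate (PySem.Str.splitlines content) 1).foldl pvStepB ([], [])
  let segments := st.1 ++ [st.2]
  let segments := if segments.length % 2 = 0 then segments.dropLast else segments
  pvTakeAlt segments 0

-- ===== PRECONDITION & SPEC =====
def Spec_lines_outside_code_fences_py (content : String) (out : List (Int × String)) : Prop := out = lines_outside_code_fences_py_alt content
instance (content : String) (out : List (Int × String)) : Decidable (Spec_lines_outside_code_fences_py content out) := by unfold Spec_lines_outside_code_fences_py; infer_instance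

-- ===== CLAIM (what is proved, stated in full; the proofs are below) =====
def Claim_equal_lines_outside_code_fences_py : Prop := ∀ (content : String), Dom_lines_outside_code_fences_py content → Spec_lines_outside_code_fences_py content (lines_outside_code_fences_py content)

-- ===== LEMMAS AND PROOFS =====

-- recursive rendering of A's toggle loop
def pvGoA : Bool → List (Int × String) → List (Int × String)
  | _, [] => []
  | b, p :: ps => if pvFence p then pvGoA (!b) ps else if !b then p :: pvGoA b ps else pvGoA b ps

-- the fence-delimited segments of a list of pairs
def pvSegs : List (Int × String) → List (List (Int × String))
  | [] => [[]]
  | p :: ps => if pvFence p then [] :: pvSegs ps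
               else match pvSegs ps with
                    | [] => [[p]]
                    | h :: t => (p :: h) :: t

-- emit alternating segments, starting outside (false) or inside (true)
def pvEmit : Bool → List (List (Int × String)) → List (Int × String)
  | _, [] => []
  | false, s :: rest => s ++ pvEmit true rest
  | true, _ :: rest => pvEmit false rest

-- structural two-step version of pvTakeAlt
def pvTakeAlt' : List (List (Int × String)) → List (Int × String)
  | [] => []
  | [s] => s
  | s :: _ :: rest => s ++ pvTakeAlt' rest

def pvConsHead (c : List (Int × String)) : List (List (Int × String)) → List (List (Int × String))
  | [] => [c]
  | h :: t => (c ++ h) :: t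

theorem pv_segs_ne_nil (ps : List (Int × String)) : pvSegs ps ≠ [] := by
  induction ps with
  | nil => simp [pvSegs]
  | cons p ps ih =>
    by_cases h : pvFence p
    · simp [pvSegs, h]
    · simp only [pvSegs, h]
      rcases hS : pvSegs ps with _ | ⟨s, t⟩ <;> simp

theorem pv_foldA (ps : List (Int × String)) :
    ∀ (acc : List (Int × String)) (b : Bool),
      (ps.foldl pvStepA (acc, b)).1 = acc ++ pvGoA b ps := by
  induction ps with
  | nil => intro acc b; simp [pvGoA]
  | cons p ps ih =>
    intro acc b
    rw [List.foldl_cons]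
    by_cases h : pvFence p
    · rw [show pvStepA (acc, b) p = (acc, !b) by simp [pvStepA, h], ih]
      simp [pvGoA, h]
    · cases b
      · rw [show pvStepA (acc, false) p = (acc ++ [p], false) by simp [pvStepA, h], ih]
        simp [pvGoA, h]
      · rw [show pvStepA (acc, true) p = (acc, true) by simp [pvStepA, h], ih]
        simp [pvGoA, h]

theorem pv_foldB (ps : List (Int × String)) :
    ∀ (segs : List (List (Int × String))) (cur : List (Int × String)),
      (ps.foldl pvStepB (segs, cur)).1 ++ [(ps.foldl pvStepB (segs, cur)).2]
        = segs ++ pvConsHead cur (pvSegs ps) := by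
  induction ps with
  | nil => intro segs cur; simp [pvSegs, pvConsHead]
  | cons p ps ih =>
    intro segs cur
    rw [List.foldl_cons]
    by_cases h : pvFence p
    · rw [show pvStepB (segs, cur) p = (segs ++ [cur], []) by simp [pvStepB, h], ih]
      rcases hS : pvSegs ps with _ | ⟨s, t⟩
      · exact absurd hS (pv_segs_ne_nil ps)
      · simp [pvSegs, h, hS, pvConsHead]
    · rw [show pvStepB (segs, cur) p = (segs, cur ++ [p]) by simp [pvStepB, h], ih]
      rcases hS : pvSegs ps with _ | ⟨s, t⟩ <;> simp [pvSegs, h, hS, pvConsHead]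

theorem pv_goA_emit (ps : List (Int × String)) :
    ∀ b, pvGoA b ps = pvEmit b (pvSegs ps) := by
  induction ps with
  | nil => intro b; cases b <;> simp [pvGoA, pvSegs, pvEmit]
  | cons p ps ih =>
    intro b
    by_cases h : pvFence p
    · cases b <;> simp [pvGoA, pvSegs, h, pvEmit, ih]
    · rcases hS : pvSegs ps with _ | ⟨s, t⟩ <;>
        cases b <;> simp [pvGoA, pvSegs, h, pvEmit, ih, hS]

theorem pvTakeAlt'_cons (s : List (Int × String)) (rest : List (List (Int × String))) :
    pvTakeAlt' (s :: rest) = s ++ pvTakeAlt' rest.tail := by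
  cases rest <;> simp [pvTakeAlt']

theorem pv_takeAlt_eq_aux (n : Nat) :
    ∀ (segments : List (List (Int × String))) (k : Nat), segments.length - k ≤ n →
      pvTakeAlt segments k = pvTakeAlt' (segments.drop k) := by
  induction n with
  | zero =>
    intro segments k hk
    rw [pvTakeAlt, if_neg (by omega), List.drop_eq_nil_of_le (by omega), pvTakeAlt']
  | succ n ih =>
    intro segments k hk
    by_cases h : k < segments.length
    · rw [pvTakeAlt, if_pos h, ih segments (k + 2) (by omega)]
      rw [List.drop_eq_getElem_cons h, pvTakeAlt'_cons]
      simp [List.tail_drop]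
      rw [List.getElem?_eq_getElem h]
      rfl
    · rw [pvTakeAlt, if_neg h, List.drop_eq_nil_of_le (by omega), pvTakeAlt']

theorem pv_takeAlt_eq (segments : List (List (Int × String))) (k : Nat) :
    pvTakeAlt segments k = pvTakeAlt' (segments.drop k) :=
  pv_takeAlt_eq_aux segments.length segments k (by omega)

theorem pv_emit_eq (S : List (List (Int × String))) :
    pvEmit false S = pvTakeAlt' (if S.length % 2 = 0 then S.dropLast else S) := by
  induction S using pvTakeAlt'.induct with
  | case1 => simp [pvEmit, pvTakeAlt']
  | case2 s => simp [pvEmit, pvTakeAlt']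
  | case3 s t rest ih =>
    have e1 : pvEmit false (s :: t :: rest) = s ++ pvEmit false rest := by simp [pvEmit]
    have hlen : (s :: t :: rest).length % 2 = rest.length % 2 := by simp; omega
    rw [e1, ih]
    rcases h0 : rest.length % 2 with _ | m
    · rw [if_pos rfl, if_pos (by omega)]
      rcases rest with _ | ⟨r, rs⟩
      · simp [pvTakeAlt']
      · rw [show (s :: t :: r :: rs).dropLast = s :: t :: (r :: rs).dropLast by
            simp [List.dropLast_cons₂]]
        rw [pvTakeAlt']
    · rw [if_neg (by omega), if_neg (by omega), pvTakeAlt']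

-- ===== VERDICT (by name: the statement is the Claim_ definition above) =====
theorem lines_outside_code_fences_py_spec : Claim_equal_lines_outside_code_fences_py := by
  intro content _
  unfold Spec_lines_outside_code_fences_py
  simp only [lines_outside_code_fences_py, lines_outside_code_fences_py_alt]
  set ps := PySem.List.enumerate (PySem.Str.splitlines content) 1 with hps
  rw [pv_foldA ps [] false, List.nil_append, pv_foldB ps [] [], List.nil_append]
  rcases hS : pvSegs ps with _ | ⟨s, t⟩
  · exact absurd hS (pv_segs_ne_nil ps)
  · simp only [pvConsHead, List.nil_append]
    rw [pv_takeAlt_eq, List.drop_zero, pv_goA_emit, hS, pv_emit_eq]
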